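-- pv_equiv track=rewrite | github.com/wahhajjaved/large_language_maniacs | downloaded_data/ctssb/cache/Hybrid-Fortran_0b37121e4c481d4c5942a334a715a18cce6387e6_before.py | getReorderedDomainsAccordingToDeclaration
-- ===== SOURCE A (Python) =====
-- def getReorderedDomainsAccordingToDeclaration(domains, dimensionSizesInDeclaration):
--     def getNextUnusedIndexForDimensionSize(domainSize, dimensionSizesInDeclaration, usedIndices):
--         index_candidate = None
--         startAt = 0
--         while True:
--             if startAt > len(dimensionSizesInDeclaration) - 1:
--                 return None
--             try:
--                 index_candidate = dimensionSizesInDeclaration[startAt:].index(domainSize) + startAt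
--             except ValueError:
--                 return None #example: happens when domains are declared for allocatables with :
--             if index_candidate in usedIndices:
--                 startAt = index_candidate + 1
--             else:
--                 break;
--         return index_candidate
--
--     if len(domains) != len(dimensionSizesInDeclaration) or len(domains) == 0:
--         return domains
--     reorderedDomains = [0] * len(domains)
--     usedIndices = []
--     fallBackToCurrentOrder = False
--     for (domainName, domainSize) in domains:
--         index = getNextUnusedIndexForDimensionSize(domainSize, dimensionSizesInDeclaration, usedIndices)
--         if index == None:
--             fallBackToCurrentOrder = True
--             break
--         usedIndices.append(index)
--         reorderedDomains[index] = (domainName, domainSize)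
--     if fallBackToCurrentOrder:
--         return domains
--     return reorderedDomains
-- ===== SOURCE B (Python) =====
-- def getReorderedDomainsAccordingToDeclaration(domains, dimensionSizesInDeclaration):
--     if len(domains) != len(dimensionSizesInDeclaration) or len(domains) == 0:
--         return domains
--     positions = {}
--     for i, size in enumerate(dimensionSizesInDeclaration):
--         positions.setdefault(size, []).append(i)
--     taken = {}
--     result = [("", "")] * len(domains)
--     for (name, size) in domains:
--         k = taken.get(size, 0)
--         bucket = positions.get(size, [])
--         if k >= len(bucket):
--             return domains
--         result[bucket[k]] = (name, size)
--         taken[size] = k + 1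
--     return result
-- ===== Notes on version B (the rewrite author's own statement) =====
-- stated objective: alternative
-- what changed: Replaces A's per-domain rescans of the declaration (repeated slice-and-index with a linear 'used indices' membership list) by a single bucketing pass (dict size -> list of its declaration indices) consumed with a per-size counter.
import Mathlib
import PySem

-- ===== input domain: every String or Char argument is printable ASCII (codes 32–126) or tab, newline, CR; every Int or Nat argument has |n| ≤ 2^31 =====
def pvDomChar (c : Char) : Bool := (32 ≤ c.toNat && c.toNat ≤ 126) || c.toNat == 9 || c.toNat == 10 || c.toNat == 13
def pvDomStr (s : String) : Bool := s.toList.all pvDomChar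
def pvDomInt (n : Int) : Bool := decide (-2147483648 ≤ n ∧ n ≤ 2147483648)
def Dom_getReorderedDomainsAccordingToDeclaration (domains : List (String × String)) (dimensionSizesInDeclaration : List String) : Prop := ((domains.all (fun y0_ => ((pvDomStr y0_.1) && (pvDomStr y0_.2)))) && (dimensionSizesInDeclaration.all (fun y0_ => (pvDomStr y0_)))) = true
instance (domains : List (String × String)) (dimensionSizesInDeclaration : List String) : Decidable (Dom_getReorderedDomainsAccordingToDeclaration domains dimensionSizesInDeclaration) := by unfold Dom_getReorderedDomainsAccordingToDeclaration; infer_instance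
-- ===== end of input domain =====

-- B replaces A's per-domain rescans of the declaration list by one bucketing pass over it
-- (dict size -> list of indices) consumed with a per-size counter; objective: alternative algorithm.

-- ===== PORT A =====
-- A's inner helper getNextUnusedIndexForDimensionSize. startAt starts at 0 and only grows,
-- so the Python slice decl[startAt:] is exactly List.drop startAt; the `startAt > len(decl)-1`
-- test is taken on Int as in Python; `except ValueError` around .index is the `none` branch.
def pvGetNextUnusedIndex (domainSize : String) (decl : List String) (usedIndices : List Int) (startAt : Nat) : Option Int :=
  if _h : (startAt : Int) > (decl.length : Int) - 1 then none
  else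
    match PySem.List.index? (decl.drop startAt) domainSize with
    | none => none
    | some j =>
        if ((j + startAt : Nat) : Int) ∈ usedIndices then
          pvGetNextUnusedIndex domainSize decl usedIndices (j + startAt + 1)
        else some ((j + startAt : Nat) : Int)
  termination_by decl.length - startAt
  decreasing_by omega

-- A's main for-loop with its early `break` (none = fallBackToCurrentOrder).
def pvLoopA (decl : List String) : List (String × String) → List (String × String) → List Int → Option (List (String × String))
  | [], reordered, _ => some reordered
  | dom :: rest, reordered, used =>
      match pvGetNextUnusedIndex dom.2 decl used 0 with
      | none => none
      | some i => pvLoopA decl rest (PySem.List.pySetD reordered i dom) (used ++ [i])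

-- Python's placeholder list [0]*n is ported with ("","") placeholders: whenever A returns
-- reorderedDomains (no fallback) every slot has been overwritten, so no placeholder leaks.
def getReorderedDomainsAccordingToDeclaration (domains : List (String × String)) (dimensionSizesInDeclaration : List String) : List (String × String) :=
  if domains.length ≠ dimensionSizesInDeclaration.length ∨ domains.length = 0 then domains
  else
    match pvLoopA dimensionSizesInDeclaration domains (List.replicate domains.length ("", "")) [] with
    | none => domains
    | some r => r

-- ===== PORT B =====
-- positions.setdefault(size, []).append(i), folded over enumerate(decl).
def pvPositions (decl : List String) : PySem.Dict String (List Int) :=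
  (PySem.List.enumerate decl 0).foldl (fun d p => d.modify p.2 [] (· ++ [p.1])) PySem.Dict.empty

-- B's main loop; `return domains` inside the loop is the `none` result.
def pvLoopB (positions : PySem.Dict String (List Int)) : List (String × String) → PySem.Dict String Int → List (String × String) → Option (List (String × String))
  | [], _, result => some result
  | dom :: rest, taken, result =>
      let k := taken.getD dom.2 0
      let bucket := positions.getD dom.2 []
      if (bucket.length : Int) ≤ k then none
      else pvLoopB positions rest (taken.insert dom.2 (k + 1)) (PySem.List.pySetD result (PySem.List.pyGetD bucket k (-1)) dom)

def getReorderedDomainsAccordingToDeclaration_alt (domains : List (String × String)) (dimensionSizesInDeclaration : List String) : List (String × String) :=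
  if domains.length ≠ dimensionSizesInDeclaration.length ∨ domains.length = 0 then domains
  else
    match pvLoopB (pvPositions dimensionSizesInDeclaration) domains PySem.Dict.empty (List.replicate domains.length ("", "")) with
    | none => domains
    | some r => r

-- ===== PRECONDITION & SPEC =====
def Spec_getReorderedDomainsAccordingToDeclaration (domains : List (String × String)) (dimensionSizesInDeclaration : List String) (out : List (String × String)) : Prop := out = getReorderedDomainsAccordingToDeclaration_alt domains dimensionSizesInDeclaration
instance (domains : List (String × String)) (dimensionSizesInDeclaration : List String) (out : List (String × String)) : Decidable (Spec_getReorderedDomainsAccordingToDeclaration domains dimensionSizesInDeclaration out) := by unfold Spec_getReorderedDomainsAccordingToDeclaration; infer_instance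

-- ===== CLAIM (what is proved, stated in full; the proofs are below) =====
def Claim_equal_getReorderedDomainsAccordingToDeclaration : Prop := ∀ (domains : List (String × String)) (dimensionSizesInDeclaration : List String), Dom_getReorderedDomainsAccordingToDeclaration domains dimensionSizesInDeclaration → Spec_getReorderedDomainsAccordingToDeclaration domains dimensionSizesInDeclaration (getReorderedDomainsAccordingToDeclaration domains dimensionSizesInDeclaration)

-- ===== LEMMAS AND PROOFS =====

-- the indices (counted from a) at which decl carries the size s, in increasing order
def pvPosFrom (decl : List String) (s : String) (a : Int) : List Int :=
  ((PySem.List.enumerate decl a).filter (fun p => p.2 == s)).map (·.1)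

theorem pvPosFrom_cons (x : String) (l : List String) (s : String) (a : Int) :
    pvPosFrom (x :: l) s a = (if x == s then [a] else []) ++ pvPosFrom l s (a + 1) := by
  simp only [pvPosFrom, PySem.List.enumerate_cons, List.filter_cons]
  by_cases hx : x == s <;> simp [hx]


theorem mem_pvPosFrom {l : List String} {s : String} {a i : Int} :
    i ∈ pvPosFrom l s a ↔ ∃ (k : Nat) (hk : k < l.length), i = a + k ∧ l[k] = s := by
  simp only [pvPosFrom, List.mem_map, List.mem_filter, PySem.List.mem_enumerate_iff]
  constructor
  · rintro ⟨p, ⟨⟨k, hk, rfl⟩, hs⟩, rfl⟩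
    exact ⟨k, hk, rfl, by simpa using hs⟩
  · rintro ⟨k, hk, rfl, hs⟩
    exact ⟨(a + k, l[k]), ⟨⟨k, hk, rfl⟩, by simpa using hs⟩, rfl⟩


theorem pvPosFrom_not_mem {l : List String} {s : String} (h : s ∉ l) (a : Int) :
    pvPosFrom l s a = [] := by
  rw [List.eq_nil_iff_forall_not_mem]
  intro i hi
  rcases mem_pvPosFrom.1 hi with ⟨k, hk, _, hs⟩
  exact h (hs ▸ List.getElem_mem hk)


theorem pvPosFrom_pairwise (l : List String) (s : String) (a : Int) :
    (pvPosFrom l s a).Pairwise (· < ·) := by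
  have := (PySem.List.pairwise_lt_enumerate l a).filter (fun p => p.2 == s)
  exact (List.pairwise_map).2 this


theorem pvPosFrom_nodup (l : List String) (s : String) (a : Int) :
    (pvPosFrom l s a).Nodup :=
  (pvPosFrom_pairwise l s a).imp (fun h => ne_of_lt h)

theorem pvPosFrom_disjoint {l : List String} {s s' : String} {i : Int}
    (h1 : i ∈ pvPosFrom l s 0) (h2 : i ∈ pvPosFrom l s' 0) : s = s' := by
  rcases mem_pvPosFrom.1 h1 with ⟨k, hk, hik, hs⟩
  rcases mem_pvPosFrom.1 h2 with ⟨k', hk', hik', hs'⟩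
  have : k = k' := by omega
  subst this; rw [← hs, ← hs']


theorem pvPosFrom_index? {l : List String} {s : String} {j : Nat}
    (h : PySem.List.index? l s = some j) (a : Int) :
    pvPosFrom l s a = (a + j) :: pvPosFrom (l.drop (j + 1)) s (a + j + 1) := by
  induction l generalizing j a with
  | nil => simp [PySem.List.index?] at h
  | cons x t ih =>
    by_cases hx : x = s
    · subst hx
      rw [PySem.List.index?_cons_self] at h
      obtain rfl : j = 0 := by simpa using h.symm
      rw [pvPosFrom_cons]
      simp
    · rw [PySem.List.index?_cons_of_ne t hx] at h
      rcases Option.map_eq_some_iff.1 h with ⟨j', hj', rfl⟩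
      rw [pvPosFrom_cons]
      have hxs : (x == s) = false := by simp [hx]
      rw [hxs]
      have h1 : a + ((j' + 1 : Nat) : Int) = (a + 1) + (j' : Int) := by push_cast; ring
      have h2 : a + ((j' + 1 : Nat) : Int) + 1 = (a + 1) + (j' : Int) + 1 := by push_cast; ring
      simp only [List.drop_succ_cons, h1, ih hj' (a + 1)]
      simp


-- A's index search returns the first matching declaration index not yet used
theorem pvGetNextUnusedIndex_spec (s : String) (decl : List String) (used : List Int) (a : Nat) :
    pvGetNextUnusedIndex s decl used a
      = ((pvPosFrom (decl.drop a) s a).filter (fun i => decide (i ∉ used))).head? := by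
  rw [pvGetNextUnusedIndex]
  split
  · rename_i hgt
    have : decl.length ≤ a := by omega
    rw [List.drop_eq_nil_of_le this]
    simp [pvPosFrom]
  · rename_i hle
    split
    · rename_i hnone
      rw [pvPosFrom_not_mem ((PySem.List.index?_eq_none_iff _ _).1 hnone) a]
      rfl
    · rename_i j hsome
      rw [pvPosFrom_index? hsome a, List.drop_drop]
      have h3 : a + (j + 1) = j + a + 1 := by omega
      have e2 : (a : Int) + (j : Int) + 1 = ((j + a + 1 : Nat) : Int) := by push_cast; ring
      have e1 : (a : Int) + (j : Int) = ((j + a : Nat) : Int) := by push_cast; ring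
      rw [h3, e2, e1, List.filter_cons]
      by_cases hmem : ((j + a : Nat) : Int) ∈ used
      · rw [if_pos hmem, pvGetNextUnusedIndex_spec s decl used (j + a + 1)]
        have hcnd : decide (((j + a : Nat) : Int) ∉ used) = false := by simpa using hmem
        rw [hcnd]
        simp
      · rw [if_neg hmem]
        have hcnd : decide (((j + a : Nat) : Int) ∉ used) = true := by simpa using hmem
        rw [hcnd]
        simp
  termination_by decl.length - a
  decreasing_by omega


-- B's bucket for s is exactly the list of declaration indices carrying s
theorem pvPositions_getD (decl : List String) (s : String) :
    (pvPositions decl).getD s [] = pvPosFrom decl s 0 := by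
  unfold pvPositions
  rw [show (PySem.List.enumerate decl 0).foldl
        (fun (d : PySem.Dict String (List Int)) (p : Int × String) => d.modify p.2 [] (· ++ [p.1]))
        PySem.Dict.empty
      = ((PySem.List.enumerate decl 0).map (fun p : Int × String => (p.2, p.1))).foldl
        (fun (d : PySem.Dict String (List Int)) (q : String × Int) => d.modify q.1 [] (· ++ [q.2]))
        PySem.Dict.empty from
      by rw [List.foldl_map]]
  rw [PySem.Dict.getD_foldl_modify_append]
  simp only [PySem.Dict.getD_empty, List.nil_append, List.filter_map, pvPosFrom, List.map_map]
  rfl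


theorem filter_not_mem_take {α : Type} [DecidableEq α] (l : List α) (k : Nat) (h : l.Nodup) :
    l.filter (fun x => decide (x ∉ l.take k)) = l.drop k := by
  have h1 : (l.take k).filter (fun x => decide (x ∉ l.take k)) = [] := by
    rw [List.filter_eq_nil_iff]
    intro x hx
    simp [hx]
  have h2 : (l.drop k).filter (fun x => decide (x ∉ l.take k)) = l.drop k := by
    rw [List.filter_eq_self]
    intro x hx
    have hd := (List.disjoint_take_drop (m := k) (n := k) h le_rfl)
    simpa using fun hmem => hd hmem hx
  have hsplit := List.filter_append (p := fun x => decide (x ∉ l.take k)) (l.take k) (l.drop k)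
  rw [List.take_append_drop] at hsplit
  rw [hsplit, h1, h2, List.nil_append]


-- the loop invariant: for every size s, the used indices among pos(s) are exactly
-- the first (taken[s]) of them
theorem pvLoop_eq (decl : List String) (doms : List (String × String)) :
    ∀ (used : List Int) (taken : PySem.Dict String Int) (result : List (String × String)),
    (∀ s, 0 ≤ taken.getD s 0) →
    (∀ s, (pvPosFrom decl s 0).filter (fun i => decide (i ∈ used))
            = (pvPosFrom decl s 0).take (taken.getD s 0).toNat) →
    pvLoopA decl doms result used = pvLoopB (pvPositions decl) doms taken result := by
  induction doms with
  | nil => intro used taken result _ _; rfl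
  | cons dom rest ih =>
    intro used taken result htk hus
    have hki : taken.getD dom.2 0 = (((taken.getD dom.2 0).toNat : Nat) : Int) :=
      (Int.toNat_of_nonneg (htk dom.2)).symm
    set s0 := dom.2 with hs0
    set P := pvPosFrom decl s0 0 with hP
    set k := (taken.getD s0 0).toNat with hk
    have hnodup : P.Nodup := pvPosFrom_nodup decl s0 0
    have hmem_iff : ∀ i ∈ P, (i ∈ used ↔ i ∈ P.take k) := by
      intro i hiP
      constructor
      · intro hiu
        have hmm : i ∈ P.filter (fun i => decide (i ∈ used)) := by
          rw [List.mem_filter]; exact ⟨hiP, by simpa using hiu⟩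
        rw [hus s0] at hmm; exact hmm
      · intro hit
        have hmm : i ∈ P.filter (fun i => decide (i ∈ used)) := by rw [hus s0]; exact hit
        simpa using (List.mem_filter.1 hmm).2
    have hfind : pvGetNextUnusedIndex s0 decl used 0 = P[k]? := by
      rw [pvGetNextUnusedIndex_spec]
      simp only [List.drop_zero, Nat.cast_zero]
      rw [← hP]
      have hcongr : P.filter (fun i => decide (i ∉ used)) = P.filter (fun x => decide (x ∉ P.take k)) :=
        List.filter_congr (fun x hx => decide_eq_decide.2 (not_congr (hmem_iff x hx)))
      rw [hcongr, filter_not_mem_take P k hnodup, List.head?_drop]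
    rw [pvLoopA, pvLoopB]
    simp only [← hs0]
    rw [pvPositions_getD decl s0, ← hP, hfind]
    rcases hPk : P[k]? with _ | i
    · -- A falls back; B's bucket is exhausted
      have hlen : P.length ≤ k := by simpa using hPk
      have hguard : ((P.length : Int) ≤ taken.getD s0 0) := by omega
      simp only [if_pos hguard]
    · have hklt : k < P.length := by
        by_contra hcon
        rw [List.getElem?_eq_none_iff.2 (by omega)] at hPk
        cases hPk
      have hival : P[k] = i := (List.getElem?_eq_some_iff.1 hPk).choose_spec
      have hguard : ¬ ((P.length : Int) ≤ taken.getD s0 0) := by omega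
      simp only [if_neg hguard]
      have hget : PySem.List.pyGetD P (taken.getD s0 0) (-1) = i := by
        rw [hki, PySem.List.pyGetD_natCast, List.getD_eq_getElem P (-1) hklt, hival]
      rw [hget]
      -- invariant preservation
      have hiP : i ∈ P := hival ▸ List.getElem_mem hklt
      have hdecomp : P.drop k = i :: P.drop (k + 1) := by
        rw [List.drop_eq_getElem_cons hklt, hival]
      apply ih
      · intro s
        by_cases hss : s = s0
        · subst hss; rw [PySem.Dict.getD_insert_self]; omega
        · rw [PySem.Dict.getD_insert_of_ne _ _ _ hss]; exact htk s
      · intro s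
        by_cases hss : s = s0
        · subst hss
          rw [PySem.Dict.getD_insert_self]
          have hk1 : (taken.getD s0 0 + 1).toNat = k + 1 := by omega
          rw [hk1, ← hP]
          have hsplit := List.filter_append (p := fun x => decide (x ∈ used ++ [i])) (P.take k) (P.drop k)
          rw [List.take_append_drop] at hsplit
          rw [hsplit, hdecomp]
          have h1 : (P.take k).filter (fun x => decide (x ∈ used ++ [i])) = P.take k := by
            rw [List.filter_eq_self]
            intro x hx
            have hxP : x ∈ P := List.mem_of_mem_take hx
            simp [List.mem_append, (hmem_iff x hxP).2 hx]
          have hinotdrop : i ∉ P.drop (k + 1) := by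
            have : (P.drop k).Nodup := hnodup.drop
            rw [hdecomp] at this
            exact (List.nodup_cons.1 this).1
          have h2 : (P.drop (k + 1)).filter (fun x => decide (x ∈ used ++ [i])) = [] := by
            rw [List.filter_eq_nil_iff]
            intro x hx
            have hxP : x ∈ P.drop k := by
              rw [hdecomp]; exact List.mem_cons_of_mem _ hx
            have hxnu : x ∉ used := by
              intro hxu
              have hxPm : x ∈ P := List.mem_of_mem_drop hxP
              exact (List.disjoint_take_drop hnodup le_rfl) ((hmem_iff x hxPm).1 hxu) hxP
            have hxni : x ≠ i := fun he => hinotdrop (he ▸ hx)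
            simp [List.mem_append, hxnu, hxni]
          rw [List.filter_cons]
          have hicond : decide (i ∈ used ++ [i]) = true := by simp
          rw [hicond, if_pos rfl, h1, h2]
          rw [List.take_add_one, List.getElem?_eq_getElem hklt, hival]
          rfl
        · rw [PySem.Dict.getD_insert_of_ne _ _ _ hss]
          have hcongr2 : (pvPosFrom decl s 0).filter (fun x => decide (x ∈ used ++ [i]))
              = (pvPosFrom decl s 0).filter (fun x => decide (x ∈ used)) := by
            apply List.filter_congr
            intro x hx
            have hxi : x ≠ i := fun he => hss (pvPosFrom_disjoint (he ▸ hx) hiP)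
            simp [List.mem_append, hxi]
          rw [hcongr2, hus s]


-- ===== VERDICT (by name: the statement is the Claim_ definition above) =====
theorem getReorderedDomainsAccordingToDeclaration_spec : Claim_equal_getReorderedDomainsAccordingToDeclaration := by
  intro domains dims _
  unfold Spec_getReorderedDomainsAccordingToDeclaration
  unfold getReorderedDomainsAccordingToDeclaration getReorderedDomainsAccordingToDeclaration_alt
  split
  · rfl
  · rw [pvLoop_eq dims domains [] PySem.Dict.empty (List.replicate domains.length ("", ""))]
    · intro s; simp [PySem.Dict.getD_empty]
    · intro s; simp [PySem.Dict.getD_empty]
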